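-- pv_equiv track=rewrite | github.com/Antonkoch999/it-academy-summer | src/Homework4/Lists_task3.py | lists_v1
-- ===== SOURCE A (Python) =====
-- def lists_v1(lst1, lst2):
--     counter = 0
--     lst = []
--     for item in lst1:
--         if item in lst2 and item in lst:
--             continue
--         else:
--             lst.append(item)
--             counter += 1
--     return counter
-- ===== SOURCE B (Python) =====
-- def lists_v1(lst1, lst2):
--     counts = {}
--     for item in lst1:
--         counts[item] = counts.get(item, 0) + 1
--     members = set(lst2)
--     total = 0
--     for item, cnt in counts.items():
--         total += 1 if item in members else cnt
--     return total
-- ===== Notes on version B (the rewrite author's own statement) =====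
-- stated objective: faster
-- what changed: B replaces A's ordered accumulate-with-seen-list loop (quadratic inner membership scans of the growing seen list and of lst2) by aggregation: one pass builds a frequency table of lst1 and a set of lst2, then a single pass over the distinct keys adds 1 for keys in lst2 and the full multiplicity otherwise.
import Mathlib
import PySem

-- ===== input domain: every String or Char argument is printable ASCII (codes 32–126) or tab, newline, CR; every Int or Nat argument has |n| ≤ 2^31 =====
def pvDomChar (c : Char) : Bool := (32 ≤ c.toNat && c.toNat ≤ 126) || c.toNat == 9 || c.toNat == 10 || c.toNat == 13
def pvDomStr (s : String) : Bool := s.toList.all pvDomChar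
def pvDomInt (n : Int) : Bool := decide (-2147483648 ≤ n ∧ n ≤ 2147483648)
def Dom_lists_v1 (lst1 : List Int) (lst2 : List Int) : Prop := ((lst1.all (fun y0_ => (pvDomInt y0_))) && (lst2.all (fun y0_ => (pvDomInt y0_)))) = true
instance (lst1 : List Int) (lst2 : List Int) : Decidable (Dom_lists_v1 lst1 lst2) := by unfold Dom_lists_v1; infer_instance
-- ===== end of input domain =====

-- B replaces A's ordered accumulate-with-seen-list loop by a frequency table of lst1 plus a set of
-- lst2 and one pass over the distinct keys (objective: faster, aggregation removes the inner scans).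

-- ===== PORT A =====
-- A: counter = 0; lst = []; for item in lst1: if item in lst2 and item in lst: continue
--    else: lst.append(item); counter += 1;  return counter
def lists_v1 (lst1 : List Int) (lst2 : List Int) : Int :=
  (lst1.foldl
    (fun (st : Int × List Int) item =>
      if lst2.contains item && st.2.contains item then st
      else (st.1 + 1, st.2 ++ [item]))
    (0, [])).1

-- ===== PORT B =====
-- B: counts = {}; for item in lst1: counts[item] = counts.get(item, 0) + 1
--    members = set(lst2); total = 0
--    for item, cnt in counts.items(): total += 1 if item in members else cnt;  return total
def lists_v1_alt (lst1 : List Int) (lst2 : List Int) : Int :=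
  let counts : PySem.Dict Int Int :=
    lst1.foldl (fun d x => d.insert x (d.getD x 0 + 1)) PySem.Dict.empty
  let members : PySem.Set Int := PySem.Set.ofList lst2
  counts.items.foldl
    (fun total p => total + (if PySem.Set.contains members p.1 then 1 else p.2)) 0

-- ===== PRECONDITION & SPEC =====
def Spec_lists_v1 (lst1 : List Int) (lst2 : List Int) (out : Int) : Prop := out = lists_v1_alt lst1 lst2
instance (lst1 : List Int) (lst2 : List Int) (out : Int) : Decidable (Spec_lists_v1 lst1 lst2 out) := by unfold Spec_lists_v1; infer_instance

-- ===== CLAIM (what is proved, stated in full; the proofs are below) =====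
def Claim_equal_lists_v1 : Prop := ∀ (lst1 : List Int) (lst2 : List Int), Dom_lists_v1 lst1 lst2 → Spec_lists_v1 lst1 lst2 (lists_v1 lst1 lst2)

-- ===== LEMMAS AND PROOFS =====

-- the common closed form: one term per distinct element of lst1
def pvClosed (lst1 : List Int) (lst2 : List Int) : Int :=
  ((PySem.Set.ofList lst1).map
    (fun k => if k ∈ lst2 then (1 : Int) else (List.count k lst1 : Int))).sum

-- membership of A's seen list after the fold
lemma pvSeenMem (lst2 : List Int) :
    ∀ (l : List Int) (c : Int) (seen : List Int) (x : Int),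
      (x ∈ (l.foldl
        (fun (st : Int × List Int) item =>
          if lst2.contains item && st.2.contains item then st
          else (st.1 + 1, st.2 ++ [item])) (c, seen)).2) ↔ x ∈ seen ∨ x ∈ l := by
  intro l
  induction l with
  | nil => intro c seen x; simp
  | cons a l ih =>
    intro c seen x
    simp only [List.foldl_cons]
    by_cases h : a ∈ lst2 ∧ a ∈ seen
    · have hc : (lst2.contains a && seen.contains a) = true := by
        rw [Bool.and_eq_true, List.contains_iff_mem, List.contains_iff_mem]; exact h
      rw [hc, if_pos rfl, ih]
      constructor
      · rintro (hs | hl)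
        · exact Or.inl hs
        · exact Or.inr (List.mem_cons_of_mem _ hl)
      · rintro (hs | hal)
        · exact Or.inl hs
        · rcases List.mem_cons.mp hal with rfl | hl
          · exact Or.inl h.2
          · exact Or.inr hl
    · have hc : (lst2.contains a && seen.contains a) = false := by
        rw [Bool.eq_false_iff]
        intro hcc
        rw [Bool.and_eq_true, List.contains_iff_mem, List.contains_iff_mem] at hcc
        exact h hcc
      rw [hc]
      simp only [Bool.false_eq_true, if_false]
      rw [ih]
      simp only [List.mem_append, List.mem_cons]
      tauto

-- sum over a nodup list when the summand changes at exactly one member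
lemma pvSumUpdate {s : List Int} (hnd : s.Nodup) {x : Int} (hx : x ∈ s)
    (f f' : Int → Int) (hagree : ∀ k ∈ s, k ≠ x → f' k = f k) :
    (s.map f').sum = (s.map f).sum + (f' x - f x) := by
  obtain ⟨s1, s2, rfl⟩ := List.append_of_mem hx
  have hx1 : x ∉ s1 := fun hh =>
    (List.disjoint_of_nodup_append hnd) hh (List.mem_cons_self)
  have hx2 : x ∉ s2 := (List.nodup_cons.mp (List.Nodup.of_append_right hnd)).1
  have h1 : s1.map f' = s1.map f := List.map_congr_left (fun k hk =>
    hagree k (List.mem_append_left _ hk) (fun h => hx1 (h ▸ hk)))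
  have h2 : s2.map f' = s2.map f := List.map_congr_left (fun k hk =>
    hagree k (List.mem_append_right _ (List.mem_cons_of_mem _ hk)) (fun h => hx2 (h ▸ hk)))
  simp [h1, h2]
  ring

-- A equals the closed form (reverse induction on lst1)
lemma pvA_closed (lst2 : List Int) : ∀ (l : List Int), lists_v1 l lst2 = pvClosed l lst2 := by
  intro l
  induction l using List.reverseRecOn with
  | nil => simp [lists_v1, pvClosed, PySem.Set.ofList_nil]
  | append_singleton l x ih =>
    have hstep : lists_v1 (l ++ [x]) lst2 =
        (if lst2.contains x &&
            ((l.foldl (fun (st : Int × List Int) item =>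
              if lst2.contains item && st.2.contains item then st
              else (st.1 + 1, st.2 ++ [item])) (0, [])).2).contains x
          then lists_v1 l lst2
          else lists_v1 l lst2 + 1) := by
      simp only [lists_v1, List.foldl_append, List.foldl_cons, List.foldl_nil]
      split <;> rfl
    have hseen : ((l.foldl (fun (st : Int × List Int) item =>
          if lst2.contains item && st.2.contains item then st
          else (st.1 + 1, st.2 ++ [item])) (0, [])).2).contains x = decide (x ∈ l) := by
      by_cases hxl : x ∈ l
      · have hmem := (pvSeenMem lst2 l 0 [] x).mpr (Or.inr hxl)
        rw [decide_eq_true hxl, List.contains_iff_mem]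
        exact hmem
      · have hnm : x ∉ (l.foldl (fun (st : Int × List Int) item =>
            if lst2.contains item && st.2.contains item then st
            else (st.1 + 1, st.2 ++ [item])) (0, [])).2 := by
          intro hmm
          rcases (pvSeenMem lst2 l 0 [] x).mp hmm with h' | h'
          · simp at h'
          · exact hxl h'
        rw [decide_eq_false hxl, Bool.eq_false_iff]
        intro hc
        exact hnm (List.contains_iff_mem.mp hc)
    rw [hstep, hseen, ih]
    by_cases hxl : x ∈ l
    · -- x already a key: ofList unchanged, only the count at x changes
      have hmem : x ∈ PySem.Set.ofList l := (PySem.Set.mem_ofList l x).mpr hxl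
      have hof : PySem.Set.ofList (l ++ [x]) = PySem.Set.ofList l := by
        rw [PySem.Set.ofList_append_singleton, PySem.Set.add_of_mem hmem]
      have hupd := pvSumUpdate (PySem.Set.nodup_ofList l) hmem
        (fun k => if k ∈ lst2 then (1 : Int) else (List.count k l : Int))
        (fun k => if k ∈ lst2 then (1 : Int) else (List.count k (l ++ [x]) : Int))
        (by
          intro k _ hk
          simp [List.count_append, List.count_nil, Ne.symm hk])
      by_cases hx2 : x ∈ lst2
      · have hb : (lst2.contains x && decide (x ∈ l)) = true := by
          simp [hx2, hxl]
        rw [hb, if_pos rfl]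
        simp only [pvClosed, hof, hupd]
        simp [hx2]
      · have hb : (lst2.contains x && decide (x ∈ l)) = false := by
          simp [hx2]
        rw [hb]
        simp only [Bool.false_eq_true, if_false, pvClosed, hof, hupd]
        simp [hx2, List.count_append]
    · -- x is a new key: one extra term, worth 1 either way
      have hof : PySem.Set.ofList (l ++ [x]) = PySem.Set.ofList l ++ [x] := by
        rw [PySem.Set.ofList_append_singleton,
          PySem.Set.add_of_not_mem (fun h => hxl ((PySem.Set.mem_ofList l x).mp h))]
      have hcond : (lst2.contains x && decide (x ∈ l)) = false := by simp [hxl]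
      rw [hcond]
      simp only [Bool.false_eq_true, if_false, pvClosed, hof, List.map_append, List.sum_append]
      have hagree : (PySem.Set.ofList l).map
            (fun k => if k ∈ lst2 then (1 : Int) else (List.count k (l ++ [x]) : Int)) =
          (PySem.Set.ofList l).map
            (fun k => if k ∈ lst2 then (1 : Int) else (List.count k l : Int)) := by
        apply List.map_congr_left
        intro k hk
        have hkx : k ≠ x := fun h => hxl (h ▸ (PySem.Set.mem_ofList l k).mp hk)
        simp [List.count_append, List.count_nil, Ne.symm hkx]
      have hlast : (if x ∈ lst2 then (1 : Int) else (List.count x (l ++ [x]) : Int)) = 1 := by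
        have hz : List.count x l = 0 := List.count_eq_zero.mpr hxl
        simp [List.count_append, hz]
      simp only [hagree, List.map_cons, List.map_nil, List.sum_cons, List.sum_nil, hlast]
      ring

-- B equals the closed form
lemma pvB_closed (lst2 : List Int) (l : List Int) : lists_v1_alt l lst2 = pvClosed l lst2 := by
  unfold lists_v1_alt pvClosed
  simp only [PySem.Dict.foldl_insert_getD_add_one_eq_counter, PySem.Dict.items_counter,
    PySem.List.foldl_add, List.map_map, zero_add]
  apply congrArg
  apply List.map_congr_left
  intro k _
  by_cases hk : k ∈ lst2
  · have hc : PySem.Set.contains (PySem.Set.ofList lst2) k = true := by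
      simp [PySem.Set.contains_eq_listContains, hk]
    simp [hk]
  · have hc : PySem.Set.contains (PySem.Set.ofList lst2) k = false := by
      simp [PySem.Set.contains_eq_listContains, hk]
    simp [hk]

-- ===== VERDICT (by name: the statement is the Claim_ definition above) =====
theorem lists_v1_spec : Claim_equal_lists_v1 := by
  intro lst1 lst2 _
  unfold Spec_lists_v1
  rw [pvA_closed lst2 lst1, pvB_closed lst2 lst1]
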